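-- pv_equiv track=rewrite | github.com/Shivam-Kadam86/WebReconToolkit | modules/report_generator.py | _generate_detailed_remediation_guide
-- ===== SOURCE A (Python) =====
-- def _generate_detailed_remediation_guide(findings):
--     """Generate detailed remediation guide organized by vulnerability type"""
--     remediation_guide = {}
--
--     # Group findings by type for remediation
--     vulnerability_types = {}
--     for finding in findings:
--         title_lower = finding.get('title', '').lower()
--
--         if 'missing security header' in title_lower or 'security header' in title_lower:
--             if 'Security Headers' not in vulnerability_types:
--                 vulnerability_types['Security Headers'] = []
--             vulnerability_types['Security Headers'].append(finding)
--         elif 'xss' in title_lower: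
--             if 'Cross-Site Scripting (XSS)' not in vulnerability_types:
--                 vulnerability_types['Cross-Site Scripting (XSS)'] = []
--             vulnerability_types['Cross-Site Scripting (XSS)'].append(finding)
--         elif 'sql injection' in title_lower or 'sql' in title_lower:
--             if 'SQL Injection' not in vulnerability_types:
--                 vulnerability_types['SQL Injection'] = []
--             vulnerability_types['SQL Injection'].append(finding)
--         elif 'directory' in title_lower or 'path' in title_lower:
--             if 'Directory and File Exposure' not in vulnerability_types:
--                 vulnerability_types['Directory and File Exposure'] = []
--             vulnerability_types['Directory and File Exposure'].append(finding)
--         elif 'information disclosure' in title_lower or 'server' in title_lower: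
--             if 'Information Disclosure' not in vulnerability_types:
--                 vulnerability_types['Information Disclosure'] = []
--             vulnerability_types['Information Disclosure'].append(finding)
--
--     # Generate remediation steps for each category
--     for vuln_type, vuln_findings in vulnerability_types.items():
--         if vuln_type == 'Security Headers':
--             remediation_guide[vuln_type] = [
--                 "Configure your web server or application to include the following security headers:",
--                 "Strict-Transport-Security: max-age=31536000; includeSubDomains; preload",
--                 "Content-Security-Policy: default-src 'self'; script-src 'self' 'unsafe-inline'",
--                 "X-Frame-Options: DENY or SAMEORIGIN",
--                 "X-Content-Type-Options: nosniff",
--                 "X-XSS-Protection: 1; mode=block",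
--                 "Referrer-Policy: strict-origin-when-cross-origin",
--                 "Test headers using online tools like securityheaders.com",
--                 "Document the implemented headers for compliance purposes"
--             ]
--
--         elif vuln_type == 'Cross-Site Scripting (XSS)':
--             remediation_guide[vuln_type] = [
--                 "Implement input validation for all user inputs",
--                 "Use output encoding/escaping when displaying user data",
--                 "Implement Content Security Policy (CSP) headers",
--                 "Use parameterized queries for database interactions",
--                 "Validate and sanitize all URL parameters",
--                 "Use secure coding frameworks that auto-escape output",
--                 "Perform regular security testing of user input fields",
--                 "Train developers on secure coding practices"
--             ]
--
--         elif vuln_type == 'SQL Injection':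
--             remediation_guide[vuln_type] = [
--                 "Use parameterized queries (prepared statements) for all database interactions",
--                 "Implement input validation and sanitization",
--                 "Apply principle of least privilege for database accounts",
--                 "Use stored procedures where appropriate",
--                 "Implement web application firewalls (WAF)",
--                 "Regular database security audits and patching",
--                 "Use ORM frameworks that provide SQL injection protection",
--                 "Conduct code reviews focusing on database interactions"
--             ]
--
--         elif vuln_type == 'Directory and File Exposure':
--             remediation_guide[vuln_type] = [
--                 "Disable directory browsing in web server configuration",
--                 "Implement proper access controls for sensitive directories",
--                 "Remove or secure unnecessary files and directories",
--                 "Use .htaccess files to restrict access (Apache)",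
--                 "Configure web.config for access restrictions (IIS)",
--                 "Implement authentication for administrative areas",
--                 "Regular audit of publicly accessible directories",
--                 "Use robots.txt to guide search engine crawling"
--             ]
--
--         elif vuln_type == 'Information Disclosure':
--             remediation_guide[vuln_type] = [
--                 "Configure server to minimize information in HTTP headers",
--                 "Remove or customize server signature headers",
--                 "Implement custom error pages that don't reveal system information",
--                 "Review and remove debug information from production",
--                 "Configure application to suppress detailed error messages",
--                 "Implement logging without exposing sensitive data",
--                 "Regular review of publicly accessible information",
--                 "Use security scanning tools to identify information leaks"
--             ]
--
--     return remediation_guide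
-- ===== SOURCE B (Python) =====
-- # B: single pass with a static remediation table; no grouping of findings,
-- # categories recorded (with their fixed remediation text) at first appearance.
--
-- _REMEDIATION_TABLE = {
--     'Security Headers': [
--         "Configure your web server or application to include the following security headers:",
--         "Strict-Transport-Security: max-age=31536000; includeSubDomains; preload",
--         "Content-Security-Policy: default-src 'self'; script-src 'self' 'unsafe-inline'",
--         "X-Frame-Options: DENY or SAMEORIGIN",
--         "X-Content-Type-Options: nosniff",
--         "X-XSS-Protection: 1; mode=block",
--         "Referrer-Policy: strict-origin-when-cross-origin",
--         "Test headers using online tools like securityheaders.com",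
--         "Document the implemented headers for compliance purposes"
--     ],
--     'Cross-Site Scripting (XSS)': [
--         "Implement input validation for all user inputs",
--         "Use output encoding/escaping when displaying user data",
--         "Implement Content Security Policy (CSP) headers",
--         "Use parameterized queries for database interactions",
--         "Validate and sanitize all URL parameters",
--         "Use secure coding frameworks that auto-escape output",
--         "Perform regular security testing of user input fields",
--         "Train developers on secure coding practices"
--     ],
--     'SQL Injection': [
--         "Use parameterized queries (prepared statements) for all database interactions",
--         "Implement input validation and sanitization",
--         "Apply principle of least privilege for database accounts",
--         "Use stored procedures where appropriate",
--         "Implement web application firewalls (WAF)",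
--         "Regular database security audits and patching",
--         "Use ORM frameworks that provide SQL injection protection",
--         "Conduct code reviews focusing on database interactions"
--     ],
--     'Directory and File Exposure': [
--         "Disable directory browsing in web server configuration",
--         "Implement proper access controls for sensitive directories",
--         "Remove or secure unnecessary files and directories",
--         "Use .htaccess files to restrict access (Apache)",
--         "Configure web.config for access restrictions (IIS)",
--         "Implement authentication for administrative areas",
--         "Regular audit of publicly accessible directories",
--         "Use robots.txt to guide search engine crawling"
--     ],
--     'Information Disclosure': [
--         "Configure server to minimize information in HTTP headers",
--         "Remove or customize server signature headers",
--         "Implement custom error pages that don't reveal system information",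
--         "Review and remove debug information from production",
--         "Configure application to suppress detailed error messages",
--         "Implement logging without exposing sensitive data",
--         "Regular review of publicly accessible information",
--         "Use security scanning tools to identify information leaks"
--     ],
-- }
--
--
-- def _classify(title_lower):
--     # 'missing security header' contains 'security header', and 'sql injection'
--     # contains 'sql', so one check per keyword group suffices.
--     if 'security header' in title_lower:
--         return 'Security Headers'
--     if 'xss' in title_lower:
--         return 'Cross-Site Scripting (XSS)'
--     if 'sql' in title_lower:
--         return 'SQL Injection'
--     if 'directory' in title_lower or 'path' in title_lower:
--         return 'Directory and File Exposure'
--     if 'information disclosure' in title_lower or 'server' in title_lower: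
--         return 'Information Disclosure'
--     return None
--
--
-- def _generate_detailed_remediation_guide(findings):
--     """Generate detailed remediation guide organized by vulnerability type"""
--     remediation_guide = {}
--     for finding in findings:
--         category = _classify(finding.get('title', '').lower())
--         if category is not None and category not in remediation_guide:
--             remediation_guide[category] = _REMEDIATION_TABLE[category]
--     return remediation_guide
-- ===== Notes on version B (the rewrite author's own statement) =====
-- stated objective: simpler
-- what changed: B replaces A's two phases (group findings into a dict of lists, then iterate the dict matching each key against the five names to emit its text) by one pass with a static category->remediation table: each finding is classified (dropping the redundant 'missing security header' and 'sql injection' checks subsumed by 'security header'/'sql') and the first appearance of a category directly inserts its table entry, so the grouped findings lists are never built.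
import Mathlib
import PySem

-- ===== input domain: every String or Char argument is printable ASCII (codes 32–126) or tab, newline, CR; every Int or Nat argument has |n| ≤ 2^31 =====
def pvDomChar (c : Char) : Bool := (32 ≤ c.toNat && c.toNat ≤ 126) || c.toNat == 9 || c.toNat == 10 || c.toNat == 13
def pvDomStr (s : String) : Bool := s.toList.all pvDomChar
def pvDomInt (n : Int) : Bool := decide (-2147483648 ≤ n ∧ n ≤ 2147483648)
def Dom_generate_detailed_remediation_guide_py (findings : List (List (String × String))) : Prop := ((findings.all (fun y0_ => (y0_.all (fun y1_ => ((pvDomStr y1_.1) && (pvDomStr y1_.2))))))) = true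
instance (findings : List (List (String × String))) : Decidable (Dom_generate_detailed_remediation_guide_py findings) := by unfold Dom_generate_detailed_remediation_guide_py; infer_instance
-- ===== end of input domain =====

-- B replaces A's group-then-emit two phases by one classifying pass over a static
-- remediation table; equivalence of the returned dict (items in insertion order) is proved.


-- remediation texts (shared literals; both Python sources carry them verbatim)
def pvTextSH : List String := [
  "Configure your web server or application to include the following security headers:",
  "Strict-Transport-Security: max-age=31536000; includeSubDomains; preload",
  "Content-Security-Policy: default-src 'self'; script-src 'self' 'unsafe-inline'",
  "X-Frame-Options: DENY or SAMEORIGIN",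
  "X-Content-Type-Options: nosniff",
  "X-XSS-Protection: 1; mode=block",
  "Referrer-Policy: strict-origin-when-cross-origin",
  "Test headers using online tools like securityheaders.com",
  "Document the implemented headers for compliance purposes"]
def pvTextXSS : List String := [
  "Implement input validation for all user inputs",
  "Use output encoding/escaping when displaying user data",
  "Implement Content Security Policy (CSP) headers",
  "Use parameterized queries for database interactions",
  "Validate and sanitize all URL parameters",
  "Use secure coding frameworks that auto-escape output",
  "Perform regular security testing of user input fields",
  "Train developers on secure coding practices"]
def pvTextSQL : List String := [
  "Use parameterized queries (prepared statements) for all database interactions",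
  "Implement input validation and sanitization",
  "Apply principle of least privilege for database accounts",
  "Use stored procedures where appropriate",
  "Implement web application firewalls (WAF)",
  "Regular database security audits and patching",
  "Use ORM frameworks that provide SQL injection protection",
  "Conduct code reviews focusing on database interactions"]
def pvTextDIR : List String := [
  "Disable directory browsing in web server configuration",
  "Implement proper access controls for sensitive directories",
  "Remove or secure unnecessary files and directories",
  "Use .htaccess files to restrict access (Apache)",
  "Configure web.config for access restrictions (IIS)",
  "Implement authentication for administrative areas",
  "Regular audit of publicly accessible directories",
  "Use robots.txt to guide search engine crawling"]
def pvTextINFO : List String := [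
  "Configure server to minimize information in HTTP headers",
  "Remove or customize server signature headers",
  "Implement custom error pages that don't reveal system information",
  "Review and remove debug information from production",
  "Configure application to suppress detailed error messages",
  "Implement logging without exposing sensitive data",
  "Regular review of publicly accessible information",
  "Use security scanning tools to identify information leaks"]

-- ===== PORT A =====
-- `if k not in vt: vt[k] = []` followed by `vt[k].append(finding)`
def pvAddA (vt : PySem.Dict String (List (List (String × String)))) (k : String)
    (finding : List (String × String)) : PySem.Dict String (List (List (String × String))) :=
  let vt1 := if vt.contains k = false then vt.insert k [] else vt
  vt1.modify k [] (fun l => l ++ [finding])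

-- body of A's first loop (group findings by type)
def pvGroupStepA (vt : PySem.Dict String (List (List (String × String))))
    (finding : List (String × String)) : PySem.Dict String (List (List (String × String))) :=
  let t := PySem.Str.lower ((PySem.Dict.ofList finding).getD "title" "")
  if PySem.Str.isIn "missing security header" t || PySem.Str.isIn "security header" t then
    pvAddA vt "Security Headers" finding
  else if PySem.Str.isIn "xss" t then
    pvAddA vt "Cross-Site Scripting (XSS)" finding
  else if PySem.Str.isIn "sql injection" t || PySem.Str.isIn "sql" t then
    pvAddA vt "SQL Injection" finding
  else if PySem.Str.isIn "directory" t || PySem.Str.isIn "path" t then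
    pvAddA vt "Directory and File Exposure" finding
  else if PySem.Str.isIn "information disclosure" t || PySem.Str.isIn "server" t then
    pvAddA vt "Information Disclosure" finding
  else vt

-- body of A's second loop (emit remediation steps per category)
def pvGuideStepA (g : PySem.Dict String (List String))
    (p : String × List (List (String × String))) : PySem.Dict String (List String) :=
  if p.1 = "Security Headers" then g.insert p.1 pvTextSH
  else if p.1 = "Cross-Site Scripting (XSS)" then g.insert p.1 pvTextXSS
  else if p.1 = "SQL Injection" then g.insert p.1 pvTextSQL
  else if p.1 = "Directory and File Exposure" then g.insert p.1 pvTextDIR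
  else if p.1 = "Information Disclosure" then g.insert p.1 pvTextINFO
  else g

def generate_detailed_remediation_guide_py (findings : List (List (String × String))) : List (String × List String) :=
  let vt := findings.foldl pvGroupStepA PySem.Dict.empty
  (vt.items.foldl pvGuideStepA PySem.Dict.empty).items

-- ===== PORT B =====
-- _REMEDIATION_TABLE lookup
def pvTable (k : String) : List String :=
  if k = "Security Headers" then pvTextSH
  else if k = "Cross-Site Scripting (XSS)" then pvTextXSS
  else if k = "SQL Injection" then pvTextSQL
  else if k = "Directory and File Exposure" then pvTextDIR
  else if k = "Information Disclosure" then pvTextINFO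
  else []

-- _classify
def pvClassify (t : String) : Option String :=
  if PySem.Str.isIn "security header" t then some "Security Headers"
  else if PySem.Str.isIn "xss" t then some "Cross-Site Scripting (XSS)"
  else if PySem.Str.isIn "sql" t then some "SQL Injection"
  else if PySem.Str.isIn "directory" t || PySem.Str.isIn "path" t then some "Directory and File Exposure"
  else if PySem.Str.isIn "information disclosure" t || PySem.Str.isIn "server" t then some "Information Disclosure"
  else none

-- body of B's single loop
def pvStepB (g : PySem.Dict String (List String)) (finding : List (String × String)) :
    PySem.Dict String (List String) :=
  match pvClassify (PySem.Str.lower ((PySem.Dict.ofList finding).getD "title" "")) with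
  | none => g
  | some c => if g.contains c then g else g.insert c (pvTable c)

def generate_detailed_remediation_guide_py_alt (findings : List (List (String × String))) : List (String × List String) :=
  (findings.foldl pvStepB PySem.Dict.empty).items

-- ===== PRECONDITION & SPEC =====
def Spec_generate_detailed_remediation_guide_py (findings : List (List (String × String))) (out : List (String × List String)) : Prop := out = generate_detailed_remediation_guide_py_alt findings
instance (findings : List (List (String × String))) (out : List (String × List String)) : Decidable (Spec_generate_detailed_remediation_guide_py findings out) := by unfold Spec_generate_detailed_remediation_guide_py; infer_instance

-- ===== CLAIM (what is proved, stated in full; the proofs are below) =====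
def Claim_equal_generate_detailed_remediation_guide_py : Prop := ∀ (findings : List (List (String × String))), Dom_generate_detailed_remediation_guide_py findings → Spec_generate_detailed_remediation_guide_py findings (generate_detailed_remediation_guide_py findings)

-- ===== LEMMAS AND PROOFS =====
def pvFive : List String :=
  ["Security Headers", "Cross-Site Scripting (XSS)", "SQL Injection",
   "Directory and File Exposure", "Information Disclosure"]

lemma pvCondSH (t : String) :
    (PySem.Str.isIn "missing security header" t || PySem.Str.isIn "security header" t)
      = PySem.Str.isIn "security header" t := by
  cases h : PySem.Str.isIn "security header" t with
  | true => simp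
  | false =>
    simp only [Bool.or_false]
    cases h2 : PySem.Str.isIn "missing security header" t with
    | false => rfl
    | true =>
      exfalso
      rw [PySem.Str.isIn_iff_infix] at h2
      have hsub : ("security header").toList <:+: ("missing security header").toList := by decide
      have h3 : PySem.Str.isIn "security header" t = true :=
        (PySem.Str.isIn_iff_infix _ _).mpr (hsub.trans h2)
      rw [h] at h3
      exact Bool.false_ne_true h3

lemma pvCondSQL (t : String) :
    (PySem.Str.isIn "sql injection" t || PySem.Str.isIn "sql" t)
      = PySem.Str.isIn "sql" t := by
  cases h : PySem.Str.isIn "sql" t with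
  | true => simp
  | false =>
    simp only [Bool.or_false]
    cases h2 : PySem.Str.isIn "sql injection" t with
    | false => rfl
    | true =>
      exfalso
      rw [PySem.Str.isIn_iff_infix] at h2
      have hsub : ("sql").toList <:+: ("sql injection").toList := by decide
      have h3 : PySem.Str.isIn "sql" t = true :=
        (PySem.Str.isIn_iff_infix _ _).mpr (hsub.trans h2)
      rw [h] at h3
      exact Bool.false_ne_true h3

-- A's if-chain is B's classifier followed by pvAddA
lemma pvGroupStepA_eq (vt : PySem.Dict String (List (List (String × String))))
    (finding : List (String × String)) :
    pvGroupStepA vt finding =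
      match pvClassify (PySem.Str.lower ((PySem.Dict.ofList finding).getD "title" "")) with
      | none => vt
      | some c => pvAddA vt c finding := by
  simp only [pvGroupStepA, pvClassify, pvCondSH, pvCondSQL]
  split_ifs <;> rfl

lemma pvClassify_mem_five (t : String) (c : String) (h : pvClassify t = some c) : c ∈ pvFive := by
  unfold pvClassify at h
  split_ifs at h <;> simp_all [pvFive]

lemma pvKeys_addA (vt : PySem.Dict String (List (List (String × String)))) (k : String)
    (finding : List (String × String)) :
    (pvAddA vt k finding).keys = if vt.contains k then vt.keys else vt.keys ++ [k] := by
  unfold pvAddA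
  by_cases h : vt.contains k = true
  · rw [if_neg (by simp [h]), PySem.Dict.keys_modify,
      PySem.Dict.keys_insert_of_contains vt _ h, if_pos h]
  · have hf : vt.contains k = false := by simpa using h
    rw [if_pos hf, PySem.Dict.keys_modify,
      PySem.Dict.keys_insert_of_contains _ _ (PySem.Dict.contains_insert_self vt k []),
      PySem.Dict.keys_insert_of_not_contains _ _ hf, if_neg (by simp [hf])]

-- pvGuideStepA on a category name inserts the table row
lemma pvGuideStepA_of_five (g : PySem.Dict String (List String))
    (p : String × List (List (String × String))) (h : p.1 ∈ pvFive) :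
    pvGuideStepA g p = g.insert p.1 (pvTable p.1) := by
  simp only [pvFive, List.mem_cons, List.not_mem_nil, or_false] at h
  rcases h with h | h | h | h | h <;> simp [pvGuideStepA, pvTable, h]

-- A's second loop over distinct in-five keys is a map
lemma pvLoop2 (l : List (String × List (List (String × String))))
    (g : PySem.Dict String (List String))
    (h5 : ∀ p ∈ l, p.1 ∈ pvFive)
    (hnd : (l.map Prod.fst).Nodup)
    (hdisj : ∀ p ∈ l, g.contains p.1 = false) :
    (l.foldl pvGuideStepA g).items = g.items ++ l.map (fun p => (p.1, pvTable p.1)) := by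
  induction l generalizing g with
  | nil => simp
  | cons p l ih =>
    simp only [List.foldl_cons, List.map_cons]
    rw [pvGuideStepA_of_five g p (h5 p (by simp))]
    rw [ih _ (fun q hq => h5 q (by simp [hq])) (by simpa using hnd.of_cons)
      (fun q hq => by
        rw [PySem.Dict.contains_insert]
        have hne : q.1 ≠ p.1 := by
          simp only [List.map_cons, List.nodup_cons] at hnd
          exact fun he => hnd.1 (he ▸ List.mem_map_of_mem hq)
        simp [hne, hdisj q (by simp [hq])])]
    rw [PySem.Dict.items_insert_of_not_contains _ _ (hdisj p (by simp))]
    simp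

-- the simultaneous invariant of A's first loop and B's loop
lemma pvLoop1 (l : List (List (String × String)))
    (vt : PySem.Dict String (List (List (String × String))))
    (g : PySem.Dict String (List String))
    (hnd : vt.keys.Nodup)
    (h5 : ∀ k ∈ vt.keys, k ∈ pvFive)
    (hk : g.keys = vt.keys)
    (hi : g.items = vt.keys.map (fun k => (k, pvTable k))) :
    (l.foldl pvGroupStepA vt).keys.Nodup ∧
    (∀ k ∈ (l.foldl pvGroupStepA vt).keys, k ∈ pvFive) ∧
    (l.foldl pvStepB g).keys = (l.foldl pvGroupStepA vt).keys ∧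
    (l.foldl pvStepB g).items = (l.foldl pvGroupStepA vt).keys.map (fun k => (k, pvTable k)) := by
  induction l generalizing vt g with
  | nil => exact ⟨hnd, h5, hk, hi⟩
  | cons f l ih =>
    simp only [List.foldl_cons]
    rw [pvGroupStepA_eq vt f]
    unfold pvStepB
    cases hc : pvClassify (PySem.Str.lower ((PySem.Dict.ofList f).getD "title" "")) with
    | none => exact ih vt g hnd h5 hk hi
    | some c =>
      have hcc : (g.contains c) = (vt.contains c) := by
        rw [PySem.Dict.contains_eq_decide_mem_keys, PySem.Dict.contains_eq_decide_mem_keys, hk]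
      by_cases hmem : vt.contains c = true
      · have hkeys : (pvAddA vt c f).keys = vt.keys := by rw [pvKeys_addA, if_pos hmem]
        simp only [hcc, hmem]
        exact ih _ g (hkeys ▸ hnd) (hkeys ▸ h5) (hkeys ▸ hk) (hkeys ▸ hi)
      · have hmf : vt.contains c = false := by simpa using hmem
        have hkeys : (pvAddA vt c f).keys = vt.keys ++ [c] :=
          by rw [pvKeys_addA, hmf]; rfl
        have hgf : g.contains c = false := by rw [hcc]; exact hmf
        simp only [hcc, hmf, Bool.false_eq_true, if_false]
        refine ih _ _ (hkeys ▸ ?_) (hkeys ▸ ?_) ?_ ?_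
        · have hcnot : c ∉ vt.keys := by
            intro hmem'
            rw [PySem.Dict.contains_eq_decide_mem_keys] at hmf
            simp [hmem'] at hmf
          simp only [List.nodup_append, List.nodup_cons, List.not_mem_nil, not_false_iff,
            List.nodup_nil, and_true, true_and, hnd]
          intro a ha b hb
          rw [List.mem_singleton] at hb
          exact fun hab => hcnot ((hab.trans hb) ▸ ha)
        · intro k hk'
          rcases List.mem_append.mp hk' with h | h
          · exact h5 k h
          · simp only [List.mem_singleton] at h
            exact h ▸ pvClassify_mem_five _ c hc
        · rw [hkeys, PySem.Dict.keys_insert_of_not_contains _ _ hgf, hk]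
        · rw [hkeys, PySem.Dict.items_insert_of_not_contains _ _ hgf, hi]
          simp

-- ===== VERDICT (by name: the statement is the Claim_ definition above) =====
theorem generate_detailed_remediation_guide_py_spec : Claim_equal_generate_detailed_remediation_guide_py := by
  unfold Claim_equal_generate_detailed_remediation_guide_py
  intro findings _
  unfold Spec_generate_detailed_remediation_guide_py
  unfold generate_detailed_remediation_guide_py generate_detailed_remediation_guide_py_alt
  obtain ⟨hnd, h5, hk, hi⟩ := pvLoop1 findings PySem.Dict.empty PySem.Dict.empty
    PySem.Dict.nodup_keys_empty (by simp [PySem.Dict.keys_empty])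
    (by simp [PySem.Dict.keys_empty]) (by simp [PySem.Dict.empty])
  set vt := findings.foldl pvGroupStepA PySem.Dict.empty with hvt
  rw [pvLoop2 vt.items PySem.Dict.empty
      (fun p hp => h5 p.1 (PySem.Dict.mem_keys_of_mem_items vt hp))
      (by exact hnd)
      (fun p _ => by simp [PySem.Dict.contains_empty])]
  rw [hi]
  have hempty : (PySem.Dict.empty : PySem.Dict String (List String)).items = [] := by
    simp [PySem.Dict.empty]
  rw [hempty, List.nil_append]
  simp only [PySem.Dict.keys, List.map_map]
  rfl
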